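-- pv_equiv track=rewrite | github.com/alex3287/python-2019 | codewars/level_4/date.py | writes
-- ===== SOURCE A (Python) =====
-- def writes(K):
--     y, d, h, m, s = K
--     if y:
--         if y > 1:
--             y = str(y) +' years'
--         else:
--             y =str(y) + ' year'
--     else: y = ''
--
--     if d:
--         if d > 1:
--             d = str(d) +' days'
--         else:
--             d =str(d) + ' day'
--     else: d = ''
--
--     if h:
--         if h > 1:
--             h = str(h) +' hours'
--         else:
--             h =str(h) + ' hour'
--     else: h = ''
--
--     if m:
--         if m > 1:
--             m = str(m) +' minutes'
--         else:
--             m =str(m) + ' minute'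
--     else: m = ''
--
--     if s:
--         if s > 1:
--             s = str(s) +' seconds'
--         else:
--             s =str(s) + ' second'
--     else: s = ''
--     A = [i for i in (y, d, h, m, s) if i]
--     return A
-- ===== SOURCE B (Python) =====
-- def writes(K):
--     def go(pairs):
--         if not pairs:
--             return []
--         (v, u), rest = pairs[0], pairs[1:]
--         tail = go(rest)
--         if not v:
--             return tail
--         return ['%d %s%s' % (v, u, 's' if v > 1 else '')] + tail
--     return go(list(zip(K, ('year', 'day', 'hour', 'minute', 'second'))))
-- ===== Notes on version B (the rewrite author's own statement) =====
-- stated objective: alternative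
-- what changed: Replaces A's five copy-pasted if/else blocks that rebind each component to a string followed by a final truthiness-filter comprehension with a recursive function that consumes a (value, unit) pair list and builds the result back-to-front by prepending each %-formatted pluralized entry onto the recursively built tail (no intermediate strings, no filtering pass).
import Mathlib
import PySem

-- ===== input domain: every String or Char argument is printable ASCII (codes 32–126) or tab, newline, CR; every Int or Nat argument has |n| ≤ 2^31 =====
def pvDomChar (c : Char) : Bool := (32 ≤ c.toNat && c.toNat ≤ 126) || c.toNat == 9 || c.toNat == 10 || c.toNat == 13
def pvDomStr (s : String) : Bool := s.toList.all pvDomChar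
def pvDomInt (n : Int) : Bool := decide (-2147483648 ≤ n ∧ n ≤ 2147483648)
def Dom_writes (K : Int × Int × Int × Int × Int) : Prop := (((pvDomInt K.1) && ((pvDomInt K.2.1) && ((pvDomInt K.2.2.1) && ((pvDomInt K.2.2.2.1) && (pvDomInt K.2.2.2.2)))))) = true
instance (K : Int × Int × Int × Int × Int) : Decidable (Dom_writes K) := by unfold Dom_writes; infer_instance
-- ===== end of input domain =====

-- B replaces A's five copy-pasted if/else rebinding blocks + final truthiness filter with a
-- recursive consumer of a (value, unit) pair list that prepends each formatted entry onto the
-- recursively built tail (alternative decomposition; same cost).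

-- ===== PORT A =====
def writes (K : Int × Int × Int × Int × Int) : List String :=
  let (y0, d0, h0, m0, s0) := K
  let y : String := if y0 ≠ 0 then (if y0 > 1 then PySem.Int.toStr y0 ++ " years" else PySem.Int.toStr y0 ++ " year") else ""
  let d : String := if d0 ≠ 0 then (if d0 > 1 then PySem.Int.toStr d0 ++ " days" else PySem.Int.toStr d0 ++ " day") else ""
  let h : String := if h0 ≠ 0 then (if h0 > 1 then PySem.Int.toStr h0 ++ " hours" else PySem.Int.toStr h0 ++ " hour") else ""
  let m : String := if m0 ≠ 0 then (if m0 > 1 then PySem.Int.toStr m0 ++ " minutes" else PySem.Int.toStr m0 ++ " minute") else ""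
  let s : String := if s0 ≠ 0 then (if s0 > 1 then PySem.Int.toStr s0 ++ " seconds" else PySem.Int.toStr s0 ++ " second") else ""
  List.filter (fun i => decide (i ≠ "")) [y, d, h, m, s]

-- ===== PORT B =====
-- '%d %s%s' % (v, u, sfx) for an int v is exactly str(v) + ' ' + u + sfx.
def writesAltGo : List (Int × String) → List String
  | [] => []
  | p :: rest =>
    let tail := writesAltGo rest
    if p.1 ≠ 0 then (PySem.Int.toStr p.1 ++ " " ++ p.2 ++ (if p.1 > 1 then "s" else "")) :: tail
    else tail

def writes_alt (K : Int × Int × Int × Int × Int) : List String :=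
  let (y, d, h, m, s) := K
  writesAltGo (List.zip [y, d, h, m, s] ["year", "day", "hour", "minute", "second"])

-- ===== PRECONDITION & SPEC =====
def Spec_writes (K : Int × Int × Int × Int × Int) (out : List String) : Prop := out = writes_alt K
instance (K : Int × Int × Int × Int × Int) (out : List String) : Decidable (Spec_writes K out) := by unfold Spec_writes; infer_instance

-- ===== CLAIM (what is proved, stated in full; the proofs are below) =====
def Claim_equal_writes : Prop := ∀ (K : Int × Int × Int × Int × Int), Dom_writes K → Spec_writes K (writes K)

-- ===== LEMMAS AND PROOFS =====

theorem filter_five {α : Type} (p : α → Bool) (a b c d e : α) :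
    List.filter p [a, b, c, d, e] =
      List.filter p [a] ++ List.filter p [b] ++ List.filter p [c] ++ List.filter p [d] ++ List.filter p [e] := by
  rw [← List.filter_append, ← List.filter_append, ← List.filter_append, ← List.filter_append]
  rfl

-- A's per-unit string survives the final truthiness filter exactly when the value is nonzero,
-- and then equals B's pluralized entry.
theorem seg_eq (v : Int) (u sing plur : String)
    (hs : sing = " " ++ u) (hp : plur = " " ++ u ++ "s") :
    List.filter (fun i => decide (i ≠ ""))
      [if v ≠ 0 then (if v > 1 then PySem.Int.toStr v ++ plur else PySem.Int.toStr v ++ sing) else ""] =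
    (if v ≠ 0 then [PySem.Int.toStr v ++ " " ++ u ++ (if v > 1 then "s" else "")] else []) := by
  subst hs hp
  by_cases h0 : v = 0
  · simp [h0, List.filter]
  · have hp' : PySem.Int.toStr v ++ (" " ++ u ++ "s") ≠ "" := by
      intro h
      have := congrArg String.toList h
      simp at this
    have hsng : PySem.Int.toStr v ++ (" " ++ u) ≠ "" := by
      intro h
      have := congrArg String.toList h
      simp at this
    by_cases h1 : v > 1 <;>
      simp [h0, h1, List.filter, hsng, String.append_assoc, hp']

-- B's recursive consumer, characterised as a flatMap over the pair list.
theorem go_eq_flatMap (l : List (Int × String)) :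
    writesAltGo l = l.flatMap (fun p =>
      if p.1 ≠ 0 then [PySem.Int.toStr p.1 ++ " " ++ p.2 ++ (if p.1 > 1 then "s" else "")] else []) := by
  induction l with
  | nil => rfl
  | cons a l ih =>
    simp only [writesAltGo, List.flatMap_cons, ih]
    split_ifs <;> simp

theorem writes_eq_alt (K : Int × Int × Int × Int × Int) : writes K = writes_alt K := by
  obtain ⟨y, d, h, m, s⟩ := K
  simp only [writes, writes_alt]
  rw [filter_five]
  rw [seg_eq y "year" " year" " years" (by decide) (by decide),
      seg_eq d "day" " day" " days" (by decide) (by decide),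
      seg_eq h "hour" " hour" " hours" (by decide) (by decide),
      seg_eq m "minute" " minute" " minutes" (by decide) (by decide),
      seg_eq s "second" " second" " seconds" (by decide) (by decide)]
  rw [go_eq_flatMap]
  simp [List.append_assoc]

-- ===== VERDICT (by name: the statement is the Claim_ definition above) =====
theorem writes_spec : Claim_equal_writes := by
  intro K _
  unfold Spec_writes
  exact writes_eq_alt K
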